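-- pv_equiv track=rewrite | github.com/regiszhao/engsci-year1 | 1F/ESC180 - Intro to Computer Programming/Exams/Practice Exams/2014 solutions.py | consume_all
-- ===== SOURCE A (Python) =====
-- def consume_all(decomp, op):
--     def mult(a, b):
--         return a * b
--
--     def add(a, b):
--         return a + b
--
--     ops = {"+": add, "*": mult}
--
--     while op in decomp:
--         i = decomp.index(op)
--
--         decomp[i-1:i+2] = [str(ops[op](int(decomp[i-1]), int(decomp[i+1])))]
--
--     return decomp
-- ===== SOURCE B (Python) =====
-- def consume_all(decomp, op):
--     # One left-to-right pass: each operator token combines the last emitted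
--     # value with the next token; A's repeated leftmost-index search + slice
--     # splice is replayed in a single sweep. Returns a new list (does not
--     # mutate decomp; A mutates it in place -- return value is identical).
--     def mult(a, b):
--         return a * b
--
--     def add(a, b):
--         return a + b
--
--     ops = {"+": add, "*": mult}
--
--     out = []
--     k = 0
--     n = len(decomp)
--     while k < n:
--         tok = decomp[k]
--         if tok == op:
--             out[-1] = str(ops[op](int(out[-1]), int(decomp[k + 1])))
--             k += 2
--         else:
--             out.append(tok)
--             k += 1
--     return out
-- ===== Notes on version B (the rewrite author's own statement) =====
-- stated objective: alternative
-- what changed: Replaces the repeated leftmost-index search plus slice splicing (rescanning and rebuilding the list on every operator) with a single left-to-right pass that combines each operator with the last emitted value and the next token.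
import Mathlib
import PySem

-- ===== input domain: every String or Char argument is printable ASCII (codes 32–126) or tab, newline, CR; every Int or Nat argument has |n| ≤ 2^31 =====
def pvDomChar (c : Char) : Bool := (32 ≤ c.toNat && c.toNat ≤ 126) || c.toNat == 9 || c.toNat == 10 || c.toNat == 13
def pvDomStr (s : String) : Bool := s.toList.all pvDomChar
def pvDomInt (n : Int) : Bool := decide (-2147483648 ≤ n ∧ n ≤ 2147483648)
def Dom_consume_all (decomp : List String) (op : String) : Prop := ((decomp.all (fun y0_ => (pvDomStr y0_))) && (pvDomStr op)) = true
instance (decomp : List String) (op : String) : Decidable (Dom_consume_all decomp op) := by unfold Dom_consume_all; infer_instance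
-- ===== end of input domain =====

-- B replaces A's repeated leftmost-index search + slice splicing with a single
-- left-to-right pass (objective: alternative). A mutates `decomp` in place; B builds
-- a fresh list — the equivalence proved here is about the RETURN value only.

-- ===== PORT A =====

-- ops = {"+": add, "*": mult}; looked up as ops[op] (none = KeyError)
def pvOpsA (op : String) : Option (Int → Int → Int) :=
  if op = "+" then some (fun a b => a + b)
  else if op = "*" then some (fun a b => a * b)
  else none

-- the `while op in decomp` loop; `op in decomp` + `decomp.index(op)` = index?.
-- Python raises (KeyError/ValueError/IndexError) in the `| _, _, _` arm — value [] is arbitrary there;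
-- the `if` is a termination guard: when the splice does not shrink the list Python loops forever.
def consumeAllLoop (op : String) (decomp : List String) : List String :=
  match PySem.List.index? decomp op with
  | none => decomp
  | some i =>
    match pvOpsA op,
          (PySem.List.pyGet? decomp ((i : Int) - 1)).bind PySem.Int.ofStr?,
          (PySem.List.pyGet? decomp ((i : Int) + 1)).bind PySem.Int.ofStr? with
    | some f, some a, some b =>
      -- decomp[i-1:i+2] = [str(f(a, b))]
      let d' := PySem.List.slice decomp none (some ((i : Int) - 1)) ++
                [PySem.Int.toStr (f a b)] ++
                PySem.List.slice decomp (some ((i : Int) + 2)) none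
      if _h : d'.length < decomp.length then consumeAllLoop op d' else d'
    | _, _, _ => []
termination_by decomp.length
decreasing_by simp only [d', List.length_append, List.length_cons, List.length_nil] at _h ⊢; omega

def consume_all (decomp : List String) (op : String) : List String :=
  consumeAllLoop op decomp

-- ===== PORT B =====

-- ops = {"+": add, "*": mult} of Source B
def pvOpsB (op : String) : Option (Int → Int → Int) :=
  if op = "+" then some (fun a b => a + b)
  else if op = "*" then some (fun a b => a * b)
  else none

-- the `while k < n` loop of Source B over indices k; out[-1] read = pyGet? out (-1),
-- out[-1] assignment = dropLast ++ [·]. Python raises in the `| _, _, _` and `none`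
-- arms (IndexError/KeyError/ValueError) — the value [] is arbitrary there.
def consumeAllAltLoop (op : String) (decomp : List String) (n : Nat)
    (out : List String) (k : Nat) : List String :=
  if _h : k < n then
    match PySem.List.pyGet? decomp (k : Int) with
    | none => []
    | some tok =>
      if tok = op then
        match pvOpsB op,
              (PySem.List.pyGet? out (-1)).bind PySem.Int.ofStr?,
              (PySem.List.pyGet? decomp ((k : Int) + 1)).bind PySem.Int.ofStr? with
        | some f, some a, some b =>
          consumeAllAltLoop op decomp n (out.dropLast ++ [PySem.Int.toStr (f a b)]) (k + 2)
        | _, _, _ => []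
      else
        consumeAllAltLoop op decomp n (out ++ [tok]) (k + 1)
  else out
termination_by n - k

def consume_all_alt (decomp : List String) (op : String) : List String :=
  consumeAllAltLoop op decomp decomp.length [] 0

-- ===== PRECONDITION & SPEC =====

-- Pre_: either the operator does not occur (A returns the list unchanged), or op is
-- "+"/"*" and every occurrence of op sits strictly inside the list with both of its
-- ORIGINAL neighbours parsing as Python ints. This is exactly the set of inputs on
-- which A returns: outside it Python raises (KeyError for an unknown operator,
-- ValueError/IndexError at an occurrence whose neighbour is missing or not an int
-- literal) or, for an occurrence at position 0, loops forever on the wrapped-around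
-- slice; inside it every operand A ever converts is either such an original
-- neighbour or an earlier collapse result str(int), which always parses.
def Pre_consume_all (decomp : List String) (op : String) : Prop :=
  op ∉ decomp ∨
  ((op = "+" ∨ op = "*") ∧
    ∀ i : Nat, i < decomp.length → decomp.getD i "" = op →
      1 ≤ i ∧ i + 1 < decomp.length ∧
      (PySem.Int.ofStr? (decomp.getD (i - 1) "")).isSome = true ∧
      (PySem.Int.ofStr? (decomp.getD (i + 1) "")).isSome = true)

instance (decomp : List String) (op : String) : Decidable (Pre_consume_all decomp op) := by
  unfold Pre_consume_all; infer_instance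

def pvWitness_consume_all : List String × String := (["2", "+", "3", "+", "10"], "+")

def Spec_consume_all (decomp : List String) (op : String) (out : List String) : Prop := out = consume_all_alt decomp op
instance (decomp : List String) (op : String) (out : List String) : Decidable (Spec_consume_all decomp op out) := by unfold Spec_consume_all; infer_instance

-- ===== CLAIM (what is proved, stated in full; the proofs are below) =====
def Claim_equal_consume_all : Prop := ∀ (decomp : List String) (op : String), Dom_consume_all decomp op → Pre_consume_all decomp op → Spec_consume_all decomp op (consume_all decomp op)

-- ===== LEMMAS AND PROOFS =====

-- reference form of B's pass: recursion on the not-yet-consumed suffix of decomp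
def bref (op : String) (out : List String) : List String → List String
  | [] => out
  | tok :: rest =>
    if tok = op then
      match pvOpsB op,
            (PySem.List.pyGet? out (-1)).bind PySem.Int.ofStr?,
            rest.head?.bind PySem.Int.ofStr? with
      | some f, some a, some b =>
        bref op (out.dropLast ++ [PySem.Int.toStr (f a b)]) rest.tail
      | _, _, _ => []
    else
      bref op (out ++ [tok]) rest
termination_by l => l.length
decreasing_by
  · simp [List.length_tail]
  · simp

-- B's index loop over decomp computes bref on the dropped suffix
lemma altLoop_eq_bref (op : String) (decomp : List String) :
    ∀ k out, consumeAllAltLoop op decomp decomp.length out k = bref op out (decomp.drop k) := by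
  suffices h : ∀ (m k : Nat), decomp.length - k ≤ m → ∀ out,
      consumeAllAltLoop op decomp decomp.length out k = bref op out (decomp.drop k) by
    intro k out; exact h decomp.length k (by omega) out
  intro m
  induction m with
  | zero =>
    intro k hm out
    rw [consumeAllAltLoop, dif_neg (by omega), List.drop_eq_nil_of_le (by omega), bref]
  | succ m ih =>
    intro k hm out
    rw [consumeAllAltLoop]
    by_cases hk : k < decomp.length
    · rw [dif_pos hk]
      have hdrop : decomp.drop k = decomp[k] :: decomp.drop (k + 1) :=
        (List.drop_eq_getElem_cons hk).symm ▸ rfl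
      have hget : PySem.List.pyGet? decomp (k : Int) = some decomp[k] := by
        simp [PySem.List.pyGet?_natCast, List.getElem?_eq_getElem hk]
      have hget1 : PySem.List.pyGet? decomp ((k : Int) + 1) = (decomp.drop (k + 1)).head? := by
        have : ((k : Int) + 1) = ((k + 1 : Nat) : Int) := by push_cast; ring
        rw [this, PySem.List.pyGet?_natCast, List.head?_drop]
      have htail : (decomp.drop (k + 1)).tail = decomp.drop (k + 2) := by
        rw [List.tail_drop]
      simp only [hget]
      rw [hdrop, bref]
      by_cases hop : decomp[k] = op
      · rw [if_pos hop, if_pos hop, hget1, htail]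
        cases pvOpsB op with
        | none => simp
        | some f =>
          cases ha : (PySem.List.pyGet? out (-1)).bind PySem.Int.ofStr? with
          | none => simp
          | some a =>
            cases hb : ((decomp.drop (k + 1)).head?).bind PySem.Int.ofStr? with
            | none => simp
            | some b =>
              exact ih (k + 2) (by omega) _
      · rw [if_neg hop, if_neg hop]
        exact ih (k + 1) (by omega) _
    · rw [dif_neg hk, List.drop_eq_nil_of_le (by omega), bref]

-- bref walks an op-free prefix through to the accumulator
lemma bref_append (op : String) (pre : List String) (h : op ∉ pre) :
    ∀ (out l : List String), bref op out (pre ++ l) = bref op (out ++ pre) l := by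
  induction pre with
  | nil => intro out l; simp
  | cons a pre ih =>
    intro out l
    have ha : a ≠ op := fun hc => h (hc ▸ List.mem_cons_self)
    have hpre : op ∉ pre := fun hc => h (List.mem_cons_of_mem _ hc)
    rw [List.cons_append, bref, if_neg ha, ih hpre]
    simp

lemma bref_of_not_mem (op : String) (pre : List String) (h : op ∉ pre) (out : List String) :
    bref op out pre = out ++ pre := by
  have h2 := bref_append op pre h out []
  rw [List.append_nil] at h2
  rw [h2, bref]

-- one collapse step, seen by B's pass
lemma bref_step (op : String) (f : Int → Int → Int) (pre' suf' : List String)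
    (x y : String) (a b : Int)
    (hops : pvOpsB op = some f) (hx : PySem.Int.ofStr? x = some a)
    (hy : PySem.Int.ofStr? y = some b) (hpre : op ∉ pre') (hxop : x ≠ op)
    (hcop : PySem.Int.toStr (f a b) ≠ op) :
    bref op [] (pre' ++ x :: op :: y :: suf') = bref op [] (pre' ++ PySem.Int.toStr (f a b) :: suf') := by
  rw [bref_append op pre' hpre, bref_append op pre' hpre]
  rw [bref, if_neg hxop, bref, if_pos rfl, hops]
  have hlast : PySem.List.pyGet? (pre' ++ [x]) (-1) = some x :=
    PySem.List.pyGet?_neg_one_append_singleton pre' x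
  simp only [List.nil_append]
  rw [hlast]
  simp only [Option.bind_some, hx, List.head?_cons, hy, List.tail_cons,
    List.dropLast_concat]
  rw [bref, if_neg hcop]

-- where Python raises (unknown operator / unparseable or missing operand), B's pass hits []
lemma bref_raises (op : String) (pre' : List String) (x : String) (rest : List String)
    (hpre : op ∉ pre') (hxop : x ≠ op)
    (hfail : pvOpsB op = none ∨ PySem.Int.ofStr? x = none ∨
             rest.head?.bind PySem.Int.ofStr? = none) :
    bref op [] (pre' ++ x :: op :: rest) = [] := by
  rw [bref_append op pre' hpre, List.nil_append, bref, if_neg hxop, bref, if_pos rfl]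
  rw [PySem.List.pyGet?_neg_one_append_singleton]
  cases hf : pvOpsB op with
  | none => simp
  | some f =>
    cases hx : PySem.Int.ofStr? x with
    | none => simp [hx]
    | some a =>
      cases hb : rest.head?.bind PySem.Int.ofStr? with
      | none => simp [hx]
      | some b => simp [hf, hx, hb] at hfail
-- str(n) is never the operator token
lemma toDigitsCore_chars (c : Char) (hc : ∀ k : Nat, k < 10 → c ≠ Nat.digitChar k) :
    ∀ (fuel n : Nat) (l : List Char), c ∉ l → c ∉ Nat.toDigitsCore 10 fuel n l := by
  intro fuel
  induction fuel with
  | zero => intro n l hl; simpa [Nat.toDigitsCore] using hl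
  | succ fuel ih =>
    intro n l hl
    have hd : c ∉ Nat.digitChar (n % 10) :: l := by
      intro hmem
      rcases List.mem_cons.mp hmem with h | h
      · exact hc (n % 10) (Nat.mod_lt _ (by norm_num)) h
      · exact hl h
    simp only [Nat.toDigitsCore]
    split
    · simpa using hd
    · exact ih (n / 10) _ hd

lemma toStr_ne_op (n : Int) (op : String) (hop : op = "+" ∨ op = "*") :
    PySem.Int.toStr n ≠ op := by
  intro heq
  have hchars : PySem.Int.toChars n = op.toList := by
    rw [← PySem.Int.toList_toStr, heq]
  have hops : op.toList = ['+'] ∨ op.toList = ['*'] := by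
    rcases hop with h | h <;> subst h <;> [left; right] <;> decide
  have hc : ∀ c, op.toList = [c] → ∀ k : Nat, k < 10 → c ≠ Nat.digitChar k := by
    intro c hcl k hk
    rcases hops with h | h <;> rw [h] at hcl <;>
      injection hcl with h1 _ <;> subst h1 <;>
      (intro hd; interval_cases k <;> simp_all [Nat.digitChar])
  unfold PySem.Int.toChars at hchars
  split at hchars
  · rcases hops with h | h <;> rw [h] at hchars <;> simp at hchars
  · rcases hops with h | h <;> rw [h] at hchars <;>
      [exact toDigitsCore_chars '+' (hc '+' h) _ _ [] (by simp) (hchars ▸ List.mem_singleton.mpr rfl);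
       exact toDigitsCore_chars '*' (hc '*' h) _ _ [] (by simp) (hchars ▸ List.mem_singleton.mpr rfl)]

-- a successful ops[op] lookup pins op to "+" or "*"
lemma ops_some (op : String) (f : Int → Int → Int) (h : pvOpsA op = some f) :
    op = "+" ∨ op = "*" := by
  by_cases h1 : op = "+"
  · exact Or.inl h1
  · by_cases h2 : op = "*"
    · exact Or.inr h2
    · exfalso
      unfold pvOpsA at h
      rw [if_neg h1, if_neg h2] at h
      simp at h

-- main induction: on every input whose first token is not op, A's splice loop
-- computes B's single pass (on raising inputs both ports reach their [] arms)
lemma loop_eq_bref (op : String) :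
    ∀ (N : Nat) (decomp : List String), decomp.length ≤ N →
      decomp.head? ≠ some op →
      consumeAllLoop op decomp = bref op [] decomp := by
  intro N
  induction N with
  | zero =>
    intro decomp hN hhd
    have : decomp = [] := List.length_eq_zero_iff.mp (by omega)
    subst this
    rw [consumeAllLoop, bref]
    rfl
  | succ N ih =>
    intro decomp hN hhd
    rw [consumeAllLoop.eq_def]
    cases hidx : PySem.List.index? decomp op with
    | none =>
      have hnm : op ∉ decomp := (PySem.List.index?_eq_none_iff _ _).mp hidx
      rw [bref_of_not_mem op decomp hnm]
      simp
    | some i =>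
      obtain ⟨pre, suf, hdec, hlenpre, hnmem⟩ :=
        (PySem.List.index?_eq_some_iff _ _ _).mp hidx
      have hprene : pre ≠ [] := by
        intro h
        subst h
        rw [hdec] at hhd
        simp at hhd
      obtain ⟨pre', x, hpre⟩ := List.eq_nil_or_concat pre |>.resolve_left hprene
      rw [List.concat_eq_append] at hpre
      subst hpre hdec
      have hlen' : pre'.length + 1 = i := by simpa using hlenpre
      have hxop : x ≠ op := fun h => hnmem (by simp [h])
      have hpre'op : op ∉ pre' := fun h => hnmem (by simp [h])
      -- decomp[i-1] = x
      have hgx : PySem.List.pyGet? ((pre' ++ [x]) ++ op :: suf) ((i : Int) - 1)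
          = some x := by
        have hcast : ((i : Int) - 1) = ((pre'.length : Nat) : Int) := by
          omega
        rw [hcast, PySem.List.pyGet?_natCast]
        rw [List.append_assoc, List.singleton_append]
        rw [List.getElem?_append_right (Nat.le_refl pre'.length)]
        simp
      -- decomp[i+1] = suf.head? (none = IndexError when op is last)
      have hgy : PySem.List.pyGet? ((pre' ++ [x]) ++ op :: suf) ((i : Int) + 1)
          = suf.head? := by
        have hcast : ((i : Int) + 1) = (((pre'.length + 2 : Nat)) : Int) := by
          push_cast; omega
        rw [hcast, PySem.List.pyGet?_natCast]
        have hre : (pre' ++ [x]) ++ op :: suf = (pre' ++ [x, op]) ++ suf := by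
          simp
        rw [hre, List.getElem?_append_right (by simp)]
        simp [List.head?_eq_getElem?]
      simp only [hgx, hgy, Option.bind_some]
      have hassoc0 : (pre' ++ [x]) ++ op :: suf = pre' ++ x :: op :: suf := by simp
      cases hf : pvOpsA op with
      | none =>
        have hfB : pvOpsB op = none := hf
        rw [hassoc0, bref_raises op pre' x suf hpre'op hxop (Or.inl hfB)]
      | some f =>
        have hfB : pvOpsB op = some f := hf
        have hop : op = "+" ∨ op = "*" := ops_some op f hf
        cases hx : PySem.Int.ofStr? x with
        | none =>
          rw [hassoc0, bref_raises op pre' x suf hpre'op hxop (Or.inr (Or.inl hx))]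
        | some a =>
          cases hb : suf.head?.bind PySem.Int.ofStr? with
          | none =>
            rw [hassoc0, bref_raises op pre' x suf hpre'op hxop (Or.inr (Or.inr hb))]
          | some b =>
            obtain ⟨y, suf', hsuf⟩ : ∃ y suf', suf = y :: suf' := by
              cases suf with
              | nil => simp at hb
              | cons y suf' => exact ⟨y, suf', rfl⟩
            subst hsuf
            simp only [List.head?_cons, Option.bind_some] at hb
            -- the splice: decomp[:i-1] ++ [str(f a b)] ++ decomp[i+2:]
            have hslice1 : PySem.List.slice ((pre' ++ [x]) ++ op :: y :: suf') none
                (some ((i : Int) - 1)) = pre' := by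
              have hcast : ((i : Int) - 1) = ((pre'.length : Nat) : Int) := by
                omega
              rw [hcast, PySem.List.slice_to_natCast, List.append_assoc, List.take_left']
              rfl
            have hslice2 : PySem.List.slice ((pre' ++ [x]) ++ op :: y :: suf')
                (some ((i : Int) + 2)) none = suf' := by
              have hcast : ((i : Int) + 2) = (((pre'.length + 3 : Nat)) : Int) := by
                push_cast; omega
              rw [hcast, PySem.List.slice_from_natCast]
              have hre : (pre' ++ [x]) ++ op :: y :: suf' = (pre' ++ [x, op, y]) ++ suf' := by
                simp
              rw [hre, List.drop_left' (by simp)]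
            simp only [hslice1, hslice2]
            set c := PySem.Int.toStr (f a b) with hc
            have hcop : c ≠ op := toStr_ne_op (f a b) op hop
            have hlendec : (pre' ++ [c] ++ suf').length <
                ((pre' ++ [x]) ++ op :: y :: suf').length := by simp
            rw [dif_pos hlendec]
            have hlenN : (pre' ++ [c] ++ suf').length ≤ N := by
              simp at hN ⊢; omega
            have hhd' : (pre' ++ [c] ++ suf').head? ≠ some op := by
              cases pre' with
              | nil => simpa using hcop
              | cons p ps =>
                intro h
                simp at h
                exact hpre'op (h ▸ List.mem_cons_self)
            have hassoc : (pre' ++ [x]) ++ op :: y :: suf' = pre' ++ (x :: op :: y :: suf') := by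
              simp
            rw [ih _ hlenN hhd', hassoc,
              show pre' ++ [c] ++ suf' = pre' ++ c :: suf' from by simp]
            exact (bref_step op f pre' suf' x y a b hfB hx hb hpre'op hxop hcop).symm

-- ===== VERDICT (by name: the statement is the Claim_ definition above) =====
theorem consume_all_spec : Claim_equal_consume_all := by
  intro decomp op _hdom hpre
  unfold Spec_consume_all consume_all consume_all_alt
  rw [altLoop_eq_bref op decomp 0 []]
  simp only [List.drop_zero]
  refine loop_eq_bref op decomp.length decomp (Nat.le_refl _) ?_
  intro hhd
  have hmem : op ∈ decomp := by
    cases decomp with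
    | nil => simp at hhd
    | cons t rest =>
      simp at hhd
      exact hhd ▸ List.mem_cons_self
  have h0 : decomp.getD 0 "" = op ∧ 0 < decomp.length := by
    cases decomp with
    | nil => simp at hhd
    | cons t rest =>
      simp at hhd ⊢
      exact hhd
  rcases hpre with hnm | ⟨_, hinv⟩
  · exact hnm hmem
  · have := (hinv 0 h0.2 h0.1).1
    omega
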